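-- pv_equiv track=rewrite | github.com/bpupadhyaya/programming-interviews | top/topamzbyfrequency/python/group3/race_car.py | race_car_bfs
-- ===== SOURCE A (Python) =====
-- from collections import deque
--
-- def race_car_bfs(target: int) -> int:
--     # O(t*log(t))
--     q = deque([(0, 1)])
--     visited = set([0, 1])
--     actions = 0
--     while q:
--         size = len(q)
--         for _ in range(size):
--             x, v = q.popleft()
--             if x == target:
--                 return actions
--
--             # Accelerate
--             # NOTE: if accelerating in the negative regions or passing the target by more than two times,
--             # then this is never going to reach an answer, we won't add it to the queue
--             newx = x + v
--             newv = v * 2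
--             if 0 <= newx <= 2 * target and (state := (newx, newv)) not in visited:
--                 visited.add(state)
--                 q.append(state)
--
--             # Reverse
--             newv = -1 if v > 0 else 1
--             if (state := (x, newv)) not in visited:
--                 visited.add(state)
--                 q.append(state)
--         actions += 1
-- ===== SOURCE B (Python) =====
-- def race_car_bfs(target: int) -> int:
--     # Set-based BFS by recursion on levels: the next frontier is computed wholesale
--     # as (all moves of the frontier) minus the visited set -- no queue, no
--     # per-state visited checks or adds during expansion.
--     def moves(x, v):
--         out = [(x, -1 if v > 0 else 1)]
--         nx = x + v
--         if 0 <= nx <= 2 * target: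
--             out.append((nx, 2 * v))
--         return out
--
--     def search(frontier, visited, depth):
--         if not frontier:
--             return None
--         if any(x == target for x, _ in frontier):
--             return depth
--         nxt = {s for st in frontier for s in moves(*st)} - visited
--         return search(nxt, visited | nxt, depth + 1)
--
--     return search({(0, 1)}, set(), 0)
-- ===== Notes on version B (the rewrite author's own statement) =====
-- stated objective: alternative
-- what changed: Replaces the deque-based BFS (counted popleft, per-state visited membership tests and adds, in-loop early return) by a recursive level-set search: each level is one set, the next level is computed wholesale as the set of all moves of the frontier minus the visited set, and the answer is the recursion depth at which the frontier contains the target position.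
-- outside the precondition, e.g. on race_car_bfs(-1): A returns None, B returns None
import Mathlib
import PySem

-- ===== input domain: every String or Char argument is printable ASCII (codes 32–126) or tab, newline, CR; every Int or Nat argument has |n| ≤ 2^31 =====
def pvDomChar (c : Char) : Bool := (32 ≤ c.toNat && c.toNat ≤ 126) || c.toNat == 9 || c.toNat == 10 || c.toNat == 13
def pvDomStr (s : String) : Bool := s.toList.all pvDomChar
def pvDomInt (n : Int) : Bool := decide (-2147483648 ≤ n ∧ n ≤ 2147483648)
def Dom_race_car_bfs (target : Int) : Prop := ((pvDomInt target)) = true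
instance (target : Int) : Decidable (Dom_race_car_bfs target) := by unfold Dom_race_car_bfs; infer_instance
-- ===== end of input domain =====

-- B replaces A's deque-based BFS (counted popleft, per-state visited tests/adds, in-loop
-- early return) by a recursive level-set search: next frontier = all moves of the frontier
-- minus the visited set; same cost, a genuinely different decomposition.
-- Python's `visited` in A starts as {0, 1}: the ints 0 and 1 never equal a tuple state, so
-- the effective set of visited STATES starts empty, and both ports model it as an empty set.
-- The visited sets are only membership-tested and extended, so both ports realize them as
-- Std.HashSet, and B's set build `{...} - visited` keeps a hash index, so the ports evaluate
-- fast on large targets; the proofs use only membership facts, independent of representation.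
-- A's `while q:` loop is totalized with fuel (4*target+16).toNat, far above the number of
-- BFS levels actually run on every target; B's recursion is totalized with the same fuel.

-- ===== PORT A =====
-- In the port the states appended to the queue during one level are accumulated
-- back-to-front and reversed once when the level is exhausted (the inner loop pops exactly
-- len(q) states, so the appended states are untouched until then): same queue contents,
-- linear instead of quadratic appends, so the port evaluates on large targets.

-- one popped state (x, v): try Accelerate, then Reverse, exactly A's two `q.append(state)`
def pvStepA (target : Int) (back : List (Int × Int)) (vis : Std.HashSet (Int × Int))
    (x v : Int) : List (Int × Int) × Std.HashSet (Int × Int) :=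
  let newx := x + v
  let newv := v * 2
  let st1 :=
    if (0 ≤ newx ∧ newx ≤ 2 * target) ∧ (newx, newv) ∉ vis then
      ((newx, newv) :: back, vis.insert (newx, newv))
    else (back, vis)
  let newv2 : Int := if v > 0 then (-1 : Int) else 1
  if (x, newv2) ∉ st1.2 then
    ((x, newv2) :: st1.1, st1.2.insert (x, newv2))
  else st1

-- the inner `for _ in range(size)` loop: pop the `n` states of the current level off the
-- front of the queue, appended states accumulate in `back`; `none` = Python's `return actions`
def pvLevelA (target : Int) : Nat → List (Int × Int) → List (Int × Int) →
    Std.HashSet (Int × Int) → Option (List (Int × Int) × Std.HashSet (Int × Int))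
  | 0, _, back, vis => some (back.reverse, vis)
  | n + 1, q, back, vis =>
    match q with
    | [] => some (back.reverse, vis)   -- unreachable: Python never pops more than len(q) items
    | (x, v) :: rest =>
      if x = target then none
      else
        let st := pvStepA target back vis x v
        pvLevelA target n rest st.1 st.2

-- the outer `while q:` loop, totalized by fuel
def pvLoopA (target : Int) : Nat → List (Int × Int) → Std.HashSet (Int × Int) → Int → Int
  | 0, _, _, _ => 0
  | fuel + 1, q, vis, actions =>
    if q = [] then 0
    else
      match pvLevelA target q.length q [] vis with
      | none => actions
      | some st => pvLoopA target fuel st.1 st.2 (actions + 1)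

def race_car_bfs (target : Int) : Int :=
  pvLoopA target (4 * target + 16).toNat [(0, 1)] ∅ 0

-- ===== PORT B =====
-- moves(x, v): reverse move, plus the accelerate move when it stays in [0, 2*target]
def pvMoves (target x v : Int) : List (Int × Int) :=
  let base := [(x, if v > 0 then (-1 : Int) else 1)]
  let nx := x + v
  if 0 ≤ nx ∧ nx ≤ 2 * target then base ++ [(nx, 2 * v)] else base

-- `{s for st in frontier for s in moves(*st)} - visited`: the distinct elements of l that
-- are not in vis, with a hash index for the dedup (a frontier is a set = duplicate-free list)
def pvDiffSet (vis : Std.HashSet (Int × Int)) (l : List (Int × Int)) : List (Int × Int) :=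
  (l.foldl
    (fun (acc : List (Int × Int) × Std.HashSet (Int × Int)) s =>
      if s ∈ acc.2 ∨ s ∈ vis then acc else (s :: acc.1, acc.2.insert s))
    ([], ∅)).1.reverse

-- search(frontier, visited, depth), totalized by fuel
def pvSearchB (target : Int) : Nat → List (Int × Int) → Std.HashSet (Int × Int) → Int → Int
  | 0, _, _, _ => 0
  | fuel + 1, frontier, vis, depth =>
    if frontier = [] then 0   -- Python returns None here; outside Pre_
    else if frontier.any (fun p => p.1 == target) then depth
    else
      let nxt := pvDiffSet vis (frontier.flatMap (fun p => pvMoves target p.1 p.2))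
      pvSearchB target fuel nxt (nxt.foldl (fun m s => m.insert s) vis) (depth + 1)

def race_car_bfs_alt (target : Int) : Int :=
  pvSearchB target (4 * target + 16).toNat [(0, 1)] ∅ 0

-- ===== PRECONDITION & SPEC =====
-- Pre_ excludes target < 0, on which A's queue empties and it falls off the end returning
-- None, which is not a value of the declared int return type (B returns None there too).
def Pre_race_car_bfs (target : Int) : Prop := 0 ≤ target
instance (target : Int) : Decidable (Pre_race_car_bfs target) := by
  unfold Pre_race_car_bfs; infer_instance
def pvWitness_race_car_bfs : Int := 3

def Spec_race_car_bfs (target : Int) (out : Int) : Prop := out = race_car_bfs_alt target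
instance (target : Int) (out : Int) : Decidable (Spec_race_car_bfs target out) := by
  unfold Spec_race_car_bfs; infer_instance

-- ===== CLAIM (what is proved, stated in full; the proofs are below) =====
def Claim_equal_race_car_bfs : Prop := ∀ (target : Int), Dom_race_car_bfs target → Pre_race_car_bfs target → Spec_race_car_bfs target (race_car_bfs target)

-- ===== LEMMAS AND PROOFS =====
set_option maxHeartbeats 1000000

-- the two candidate states produced from one popped state are always distinct
theorem pvCand_ne (x v : Int) : (x + v, v * 2) ≠ (x, if v > 0 then (-1 : Int) else 1) := by
  intro h
  rw [Prod.mk.injEq] at h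
  rcases h with ⟨h1, h2⟩
  split_ifs at h2 <;> omega

-- membership after one generic step: push c1 (when cond holds) then c2, each if unvisited
theorem pvStepGeneric_mem (cond : Prop) [Decidable cond] (c1 c2 : Int × Int)
    (hne : c1 ≠ c2) (back : List (Int × Int)) (vis : Std.HashSet (Int × Int)) (s : Int × Int)
    (st1 res : List (Int × Int) × Std.HashSet (Int × Int)) (mv : List (Int × Int))
    (h1 : st1 = if cond ∧ c1 ∉ vis then (c1 :: back, vis.insert c1) else (back, vis))
    (h2 : res = if c2 ∉ st1.2 then (c2 :: st1.1, st1.2.insert c2) else st1)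
    (hmv : mv = if cond then [c2, c1] else [c2]) :
    (s ∈ res.1 ↔ s ∈ back ∨ (s ∈ mv ∧ s ∉ vis)) ∧ (s ∈ res.2 ↔ s ∈ vis ∨ s ∈ mv) := by
  have hs1 : s = c1 → (s ∈ vis ↔ c1 ∈ vis) := fun h => by rw [h]
  have hs2 : s = c2 → (s ∈ vis ↔ c2 ∈ vis) := fun h => by rw [h]
  have hne' : ¬ (c2 = c1) := fun h => hne h.symm
  have hflip1 : (c1 = s) ↔ (s = c1) := eq_comm
  have hflip2 : (c2 = s) ↔ (s = c2) := eq_comm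
  subst h1; subst h2; subst hmv
  split_ifs with hA hB hB <;>
    simp only [Std.HashSet.mem_insert, beq_iff_eq, List.mem_cons, List.not_mem_nil,
      or_false, hflip1, hflip2] at * <;>
    tauto

-- membership in one popped state's output = A's allowed-move list filtered by visited
theorem pvStepA_mem (target x v : Int) (back : List (Int × Int))
    (vis : Std.HashSet (Int × Int)) (s : Int × Int) :
    (s ∈ (pvStepA target back vis x v).1 ↔
      s ∈ back ∨ (s ∈ pvMoves target x v ∧ s ∉ vis)) ∧
    (s ∈ (pvStepA target back vis x v).2 ↔ s ∈ vis ∨ s ∈ pvMoves target x v) := by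
  have h2v : (2 : Int) * v = v * 2 := mul_comm 2 v
  exact pvStepGeneric_mem (0 ≤ x + v ∧ x + v ≤ 2 * target)
    (x + v, v * 2) (x, if v > 0 then (-1 : Int) else 1) (pvCand_ne x v) back vis s
    _ _ _ rfl rfl (by simp only [pvMoves, h2v, List.singleton_append])

-- A's level loop written as a fold
def pvFoldA (target : Int) (q : List (Int × Int))
    (acc : List (Int × Int) × Std.HashSet (Int × Int)) :
    List (Int × Int) × Std.HashSet (Int × Int) :=
  q.foldl (fun acc p => pvStepA target acc.1 acc.2 p.1 p.2) acc

theorem pvLevelA_eq_fold (target : Int) : ∀ (q back : List (Int × Int))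
    (vis : Std.HashSet (Int × Int)),
    pvLevelA target q.length q back vis =
      if q.any (fun p => p.1 == target) then none
      else some ((pvFoldA target q (back, vis)).1.reverse, (pvFoldA target q (back, vis)).2) := by
  intro q
  induction q with
  | nil => intro back vis; simp only [List.length_nil, pvLevelA, List.any_nil,
      Bool.false_eq_true, if_false, pvFoldA, List.foldl_nil]
  | cons p rest ih =>
    intro back vis
    obtain ⟨x, v⟩ := p
    simp only [List.length_cons, pvLevelA, List.any_cons]
    by_cases hx : x = target
    · simp only [hx, beq_self_eq_true, Bool.true_or, if_true]
    · rw [if_neg hx, ih]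
      have hb : (x == target || rest.any fun p => p.1 == target)
          = (rest.any fun p => p.1 == target) := by
        rw [beq_eq_false_iff_ne.mpr hx, Bool.false_or]
      simp only [hb, pvFoldA, List.foldl_cons]

-- membership after folding a whole level
theorem pvFoldA_mem (target : Int) : ∀ (q back : List (Int × Int))
    (vis : Std.HashSet (Int × Int)) (s : Int × Int),
    (s ∈ (pvFoldA target q (back, vis)).1 ↔
      s ∈ back ∨ (s ∈ q.flatMap (fun p => pvMoves target p.1 p.2) ∧ s ∉ vis)) ∧
    (s ∈ (pvFoldA target q (back, vis)).2 ↔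
      s ∈ vis ∨ s ∈ q.flatMap (fun p => pvMoves target p.1 p.2)) := by
  intro q
  induction q with
  | nil =>
    intro back vis s
    simp [pvFoldA]
  | cons p rest ih =>
    intro back vis s
    obtain ⟨x, v⟩ := p
    have hstep := pvStepA_mem target x v back vis s
    have hrest := ih (pvStepA target back vis x v).1 (pvStepA target back vis x v).2 s
    simp only [pvFoldA, List.foldl_cons] at hrest ⊢
    rw [List.flatMap_cons]
    constructor
    · rw [hrest.1, hstep.1, hstep.2]
      simp only [List.mem_append]
      constructor
      · rintro ((ha | ⟨hb, hc⟩) | ⟨hd, hn⟩)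
        · exact Or.inl ha
        · exact Or.inr ⟨Or.inl hb, hc⟩
        · exact Or.inr ⟨Or.inr hd, fun hc => hn (Or.inl hc)⟩
      · rintro (ha | ⟨(hb | hd), hc⟩)
        · exact Or.inl (Or.inl ha)
        · exact Or.inl (Or.inr ⟨hb, hc⟩)
        · by_cases hb' : s ∈ pvMoves target x v
          · exact Or.inl (Or.inr ⟨hb', hc⟩)
          · exact Or.inr ⟨hd, fun h => h.elim hc hb'⟩
    · rw [hrest.2, hstep.2]
      simp only [List.mem_append]
      exact or_assoc

-- membership in B's deduplicated difference
theorem pvDiffSet_aux (vis : Std.HashSet (Int × Int)) (s : Int × Int) :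
    ∀ (l : List (Int × Int)) (acc : List (Int × Int)) (seen : Std.HashSet (Int × Int)),
    (∀ t, t ∈ acc ↔ t ∈ seen) →
    (s ∈ (l.foldl
        (fun (acc : List (Int × Int) × Std.HashSet (Int × Int)) s =>
          if s ∈ acc.2 ∨ s ∈ vis then acc else (s :: acc.1, acc.2.insert s))
        (acc, seen)).1 ↔
      s ∈ acc ∨ (s ∈ l ∧ s ∉ vis ∧ s ∉ seen)) := by
  intro l
  induction l with
  | nil => intro acc seen _; simp
  | cons a rest ih =>
    intro acc seen hinv
    have hsa1 : s = a → (s ∈ vis ↔ a ∈ vis) := fun h => by rw [h]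
    have hsa2 : s = a → (s ∈ seen ↔ a ∈ seen) := fun h => by rw [h]
    simp only [List.foldl_cons]
    by_cases h : a ∈ seen ∨ a ∈ vis
    · rw [if_pos h, ih acc seen hinv]
      simp only [List.mem_cons]
      tauto
    · rw [if_neg h]
      have hinv' : ∀ t, t ∈ a :: acc ↔ t ∈ seen.insert a := by
        intro t
        simp only [List.mem_cons, Std.HashSet.mem_insert, beq_iff_eq]
        rw [hinv t]
        exact or_congr_left eq_comm
      rw [ih (a :: acc) (seen.insert a) hinv']
      simp only [List.mem_cons, Std.HashSet.mem_insert, beq_iff_eq]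
      have hflip : (a = s) ↔ (s = a) := eq_comm
      rw [hflip]
      constructor
      · rintro ((hsa | hacc) | ⟨hl, hv, hn⟩)
        · exact Or.inr ⟨Or.inl hsa, fun hv => (hsa1 hsa).mp hv |> (fun x => h (Or.inr x)),
            fun hs => (hsa2 hsa).mp hs |> (fun x => h (Or.inl x))⟩
        · exact Or.inl hacc
        · exact Or.inr ⟨Or.inr hl, hv, fun hs => hn (Or.inr hs)⟩
      · rintro (hacc | ⟨(hsa | hl), hv, hn⟩)
        · exact Or.inl (Or.inr hacc)
        · exact Or.inl (Or.inl hsa)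
        · by_cases hsa : s = a
          · exact Or.inl (Or.inl hsa)
          · exact Or.inr ⟨hl, hv, fun hs => hs.elim hsa hn⟩

theorem pvDiffSet_mem (vis : Std.HashSet (Int × Int)) (l : List (Int × Int)) (s : Int × Int) :
    s ∈ pvDiffSet vis l ↔ s ∈ l ∧ s ∉ vis := by
  unfold pvDiffSet
  rw [List.mem_reverse, pvDiffSet_aux vis s l [] ∅ (by simp)]
  simp

-- membership after inserting a whole list into a hash set
theorem pvUnion_mem (s : Int × Int) : ∀ (l : List (Int × Int)) (vis : Std.HashSet (Int × Int)),
    s ∈ l.foldl (fun m t => m.insert t) vis ↔ s ∈ vis ∨ s ∈ l := by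
  intro l
  induction l with
  | nil => intro vis; simp
  | cons a rest ih =>
    intro vis
    simp only [List.foldl_cons, ih, Std.HashSet.mem_insert, beq_iff_eq, List.mem_cons]
    have hflip : (a = s) ↔ (s = a) := eq_comm
    rw [hflip]
    tauto

-- the two loops agree whenever queue/frontier and the two visited sets agree as sets
theorem pvLoop_eq (target : Int) : ∀ (fuel : Nat) (q F : List (Int × Int))
    (visA visB : Std.HashSet (Int × Int)) (actions : Int),
    (∀ s, s ∈ q ↔ s ∈ F) → (∀ s, s ∈ visA ↔ s ∈ visB) →
    pvLoopA target fuel q visA actions = pvSearchB target fuel F visB actions := by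
  intro fuel
  induction fuel with
  | zero => intro q F visA visB actions _ _; rfl
  | succ n ih =>
    intro q F visA visB actions hq hvis
    simp only [pvLoopA, pvSearchB]
    by_cases hqe : q = []
    · have hFe : F = [] := by
        rw [List.eq_nil_iff_forall_not_mem]
        intro s hs
        exact (List.eq_nil_iff_forall_not_mem.mp hqe s) ((hq s).mpr hs)
      rw [if_pos hqe, if_pos hFe]
    · have hFe : ¬ F = [] := by
        intro hF
        exact hqe (List.eq_nil_iff_forall_not_mem.mpr
          (fun s hs => List.eq_nil_iff_forall_not_mem.mp hF s ((hq s).mp hs)))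
      rw [if_neg hqe, if_neg hFe, pvLevelA_eq_fold]
      have hany : (q.any fun p => p.1 == target) = (F.any fun p => p.1 == target) := by
        rw [Bool.eq_iff_iff]
        simp only [List.any_eq_true, beq_iff_eq]
        exact ⟨fun ⟨p, hp, h⟩ => ⟨p, (hq p).mp hp, h⟩,
               fun ⟨p, hp, h⟩ => ⟨p, (hq p).mpr hp, h⟩⟩
      rw [hany]
      by_cases hAny : (F.any fun p => p.1 == target) = true
      · rw [if_pos hAny, if_pos hAny]
      · rw [Bool.not_eq_true] at hAny
        rw [if_neg (by simp [hAny]), if_neg (by simp [hAny])]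
        apply ih
        · -- next queue / next frontier agree as sets
          intro s
          rw [List.mem_reverse, (pvFoldA_mem target q [] visA s).1, pvDiffSet_mem]
          simp only [List.not_mem_nil, false_or, List.mem_flatMap]
          constructor
          · rintro ⟨⟨p, hp, hm⟩, hv⟩
            exact ⟨⟨p, (hq p).mp hp, hm⟩, fun h => hv ((hvis s).mpr h)⟩
          · rintro ⟨⟨p, hp, hm⟩, hv⟩
            exact ⟨⟨p, (hq p).mpr hp, hm⟩, fun h => hv ((hvis s).mp h)⟩
        · -- next visited sets agree as sets
          intro s
          rw [(pvFoldA_mem target q [] visA s).2, pvUnion_mem, pvDiffSet_mem]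
          simp only [List.mem_flatMap]
          constructor
          · rintro (h | ⟨p, hp, hm⟩)
            · exact Or.inl ((hvis s).mp h)
            · by_cases h2 : s ∈ visB
              · exact Or.inl h2
              · exact Or.inr ⟨⟨p, (hq p).mp hp, hm⟩, h2⟩
          · rintro (h | ⟨⟨p, hp, hm⟩, _⟩)
            · exact Or.inl ((hvis s).mpr h)
            · exact Or.inr ⟨p, (hq p).mpr hp, hm⟩

-- ===== VERDICT (by name: the statement is the Claim_ definition above) =====
theorem race_car_bfs_spec : Claim_equal_race_car_bfs := by
  intro target _ _
  unfold Spec_race_car_bfs race_car_bfs race_car_bfs_alt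
  exact pvLoop_eq target _ _ _ _ _ _ (fun s => Iff.rfl) (fun s => Iff.rfl)
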